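-- pv_equiv track=rewrite | github.com/miskiewiczm/primers_2 | primer_cross_eval_mem.py | comparer
-- ===== SOURCE A (Python) =====
-- def comparer(primer1, primer2):
--     if not primer1 or not primer2:
--         return -1
--     else:
--         primer2 = primer2[::-1]
--         p1_tab = '*' * (len(primer1 + primer2) - 2) + primer1
--         p2_tab = '*' * (len(primer1) - 1) + primer2
--         align = []
--
--         for i in range(len(primer1 + primer2) - 1):
--             common = list(zip(p1_tab[i:], p2_tab))
--             align.append(
--                 common.count(("A", "T")) + common.count(("T", "A")) +
--                 common.count(("C", "G")) + common.count(("G", "C"))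
--             )
--         return max(align)
-- ===== SOURCE B (Python) =====
-- def comparer(primer1, primer2):
--     # Diagonal counting: positions j of primer1 and k of primer2 pair up in
--     # A's shift i exactly when j + k = i, so count complementary (j, k) pairs
--     # per diagonal directly with tight index bounds -- no padding/reversal/zip.
--     if not primer1 or not primer2:
--         return -1
--     pairs = {('A', 'T'), ('T', 'A'), ('C', 'G'), ('G', 'C')}
--     n, m = len(primer1), len(primer2)
--     return max(
--         sum((primer1[j], primer2[d - j]) in pairs
--             for j in range(max(0, d + 1 - m), min(n, d + 1)))
--         for d in range(n + m - 1))
-- ===== Notes on version B (the rewrite author's own statement) =====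
-- stated objective: faster
-- what changed: B drops A's padded/reversed alignment strings and per-shift zip+4x count scans, instead counting complementary pairs directly on each diagonal j+k=d with tight index bounds, so each character pair is examined once.
import Mathlib
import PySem

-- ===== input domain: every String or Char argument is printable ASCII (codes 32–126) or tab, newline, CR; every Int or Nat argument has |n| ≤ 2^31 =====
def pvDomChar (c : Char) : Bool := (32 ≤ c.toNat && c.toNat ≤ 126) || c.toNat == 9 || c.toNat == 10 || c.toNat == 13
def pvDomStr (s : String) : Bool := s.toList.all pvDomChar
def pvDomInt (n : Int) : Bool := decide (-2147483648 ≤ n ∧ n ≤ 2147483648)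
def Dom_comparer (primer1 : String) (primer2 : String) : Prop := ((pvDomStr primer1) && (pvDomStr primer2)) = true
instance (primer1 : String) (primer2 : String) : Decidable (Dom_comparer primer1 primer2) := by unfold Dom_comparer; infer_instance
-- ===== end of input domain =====

-- B replaces A's padded-and-reversed string scan over all shifts by direct
-- per-diagonal counting with tight index bounds (alternative one-pass formulation).


-- ===== PORT A =====
def comparer (primer1 : String) (primer2 : String) : Int :=
  if primer1.toList = [] || primer2.toList = [] then -1
  else
    let p1 := primer1.toList
    let p2 := primer2.toList.reverse                      -- primer2 = primer2[::-1]
    let p1_tab := List.replicate (p1.length + p2.length - 2) '*' ++ p1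
    let p2_tab := List.replicate (p1.length - 1) '*' ++ p2
    let align := (List.range (p1.length + p2.length - 1)).foldl
      (fun acc (i : Nat) =>
        let common := (PySem.List.slice p1_tab (some (i : Int)) none).zip p2_tab
        acc ++ [((common.count ('A','T') + common.count ('T','A') +
                  common.count ('C','G') + common.count ('G','C') : Nat) : Int)]) []
    (PySem.List.max? align (fun x => x)).getD 0           -- max(align); align is nonempty

-- ===== PORT B =====
def isCompPair (p : Char × Char) : Bool :=
  p == ('A','T') || p == ('T','A') || p == ('C','G') || p == ('G','C')

def comparer_alt (primer1 : String) (primer2 : String) : Int :=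
  if primer1.toList = [] || primer2.toList = [] then -1
  else
    let a := primer1.toList
    let b := primer2.toList
    let n := a.length
    let m := b.length
    let vals := (List.range (n + m - 1)).map (fun d =>
      ((List.range' (max 0 (d + 1 - m)) (min n (d + 1) - max 0 (d + 1 - m))).countP
        (fun j => isCompPair (a.getD j '*', b.getD (d - j) '*')) : Int))
    (PySem.List.max? vals (fun x => x)).getD 0            -- max(...); vals is nonempty

-- ===== PRECONDITION & SPEC =====
def Spec_comparer (primer1 : String) (primer2 : String) (out : Int) : Prop := out = comparer_alt primer1 primer2
instance (primer1 : String) (primer2 : String) (out : Int) : Decidable (Spec_comparer primer1 primer2 out) := by unfold Spec_comparer; infer_instance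

-- ===== CLAIM (what is proved, stated in full; the proofs are below) =====
def Claim_equal_comparer : Prop := ∀ (primer1 : String) (primer2 : String), Dom_comparer primer1 primer2 → Spec_comparer primer1 primer2 (comparer primer1 primer2)


-- ===== LEMMAS AND PROOFS =====

lemma starFst (y : Char) : isCompPair ('*', y) = false := by
  simp [isCompPair]

lemma starSnd (x : Char) : isCompPair (x, '*') = false := by
  simp [isCompPair]

-- the four tuple-counts of A sum to one countP with the combined predicate
lemma count4_eq_countP (l : List (Char × Char)) :
    l.count ('A','T') + l.count ('T','A') + l.count ('C','G') + l.count ('G','C')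
      = l.countP isCompPair := by
  induction l with
  | nil => simp
  | cons x t ih =>
    simp only [List.count_cons, List.countP_cons, isCompPair]
    by_cases h1 : x == (('A','T') : Char × Char) <;>
      by_cases h2 : x == (('T','A') : Char × Char) <;>
      by_cases h3 : x == (('C','G') : Char × Char) <;>
      by_cases h4 : x == (('G','C') : Char × Char) <;>
      simp_all <;> omega

-- countP over a list as countP over its index range
lemma countP_eq_range (P : Char × Char → Bool) (l : List (Char × Char)) :
    l.countP P = (List.range l.length).countP (fun q => P (l.getD q ('*','*'))) := by
  induction l with
  | nil => simp
  | cons x t ih =>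
    rw [List.length_cons, List.range_succ_eq_map]
    simp only [List.countP_cons, List.countP_map, List.getD_cons_zero]
    rw [ih]
    have : List.countP (fun q => P (t.getD q ('*', '*'))) (List.range t.length)
        = List.countP ((fun q => P ((x :: t).getD q ('*', '*'))) ∘ Nat.succ) (List.range t.length) :=
      List.countP_congr (fun q hq => by simp)
    omega

-- leading stars in the first zipped list contribute nothing and shift the second
lemma countP_zip_stars_left (P : Char × Char → Bool) (hP : ∀ y, P ('*', y) = false)
    (u : Nat) (x y : List Char) :
    ((List.replicate u '*' ++ x).zip y).countP P = (x.zip (y.drop u)).countP P := by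
  induction u generalizing y with
  | zero => simp
  | succ k ih =>
    cases y with
    | nil => simp
    | cons h t => simp [List.replicate_succ, hP, ih t]

lemma countP_zip_stars_right (P : Char × Char → Bool) (hP : ∀ x, P (x, '*') = false)
    (u : Nat) (x y : List Char) :
    (x.zip (List.replicate u '*' ++ y)).countP P = ((x.drop u).zip y).countP P := by
  induction u generalizing x with
  | zero => simp
  | succ k ih =>
    cases x with
    | nil => simp
    | cons h t => simp [List.replicate_succ, hP, ih t]

-- zipping against a reversed list, expressed over indices
lemma countP_zip_reverse (P : Char × Char → Bool) (x y : List Char) :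
    (x.zip y.reverse).countP P
      = (List.range (min x.length y.length)).countP
          (fun q => P (x.getD q '*', y.getD (y.length - 1 - q) '*')) := by
  rw [countP_eq_range]
  have hlen : (x.zip y.reverse).length = min x.length y.length := by simp
  rw [hlen]
  apply List.countP_congr
  intro q hq
  rw [List.mem_range] at hq
  have hq1 : q < x.length := lt_of_lt_of_le hq (min_le_left _ _)
  have hq2 : q < y.length := lt_of_lt_of_le hq (min_le_right _ _)
  have hz : q < (x.zip y.reverse).length := by rw [hlen]; exact hq
  rw [List.getD_eq_getElem _ _ hz, List.getElem_zip, List.getElem_reverse,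
    List.getD_eq_getElem _ _ hq1, List.getD_eq_getElem _ _ (by omega : y.length - 1 - q < y.length)]

-- per-shift value of A = per-diagonal value of B
lemma elem_eq (a b : List Char) (ha : a ≠ []) (hb : b ≠ []) (i : Nat)
    (hi : i < a.length + b.length - 1) :
    (((List.replicate (a.length + b.length - 2) '*' ++ a).drop i).zip
      (List.replicate (a.length - 1) '*' ++ b.reverse)).countP isCompPair
    = (List.range' (max 0 (i + 1 - b.length))
        (min a.length (i + 1) - max 0 (i + 1 - b.length))).countP
        (fun j => isCompPair (a.getD j '*', b.getD (i - j) '*')) := by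
  have hn : 1 ≤ a.length := List.length_pos_iff.mpr ha
  have hm : 1 ≤ b.length := List.length_pos_iff.mpr hb
  rw [List.drop_append_of_le_length (by simp; omega), List.drop_replicate]
  rw [countP_zip_stars_left _ starFst]
  by_cases h : i + 1 ≤ b.length
  · have hdrop : (List.replicate (a.length - 1) '*' ++ b.reverse).drop
        (a.length + b.length - 2 - i) = b.reverse.drop (b.length - (i + 1)) := by
      rw [List.drop_append, List.drop_replicate, List.length_replicate]
      rw [show a.length - 1 - (a.length + b.length - 2 - i) = 0 from by omega,
          show a.length + b.length - 2 - i - (a.length - 1) = b.length - (i + 1) from by omega]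
      simp
    rw [hdrop, ← List.reverse_take, countP_zip_reverse]
    rw [show max 0 (i + 1 - b.length) = 0 from by omega, Nat.sub_zero,
        ← List.range_eq_range']
    have hlen : (List.take (i + 1) b).length = i + 1 := by simp; omega
    rw [hlen]
    apply List.countP_congr
    intro q hq
    rw [List.mem_range] at hq
    have hq1 : i - q < (List.take (i + 1) b).length := by omega
    have hq2 : i - q < b.length := by omega
    rw [show i + 1 - 1 - q = i - q from by omega,
        List.getD_eq_getElem _ _ hq1, List.getD_eq_getElem _ _ hq2, List.getElem_take]
  · have hdrop : (List.replicate (a.length - 1) '*' ++ b.reverse).drop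
        (a.length + b.length - 2 - i) = List.replicate (i + 1 - b.length) '*' ++ b.reverse := by
      rw [List.drop_append_of_le_length (by simp; omega), List.drop_replicate,
          show a.length - 1 - (a.length + b.length - 2 - i) = i + 1 - b.length from by omega]
    rw [hdrop, countP_zip_stars_right _ starSnd, countP_zip_reverse]
    rw [show max 0 (i + 1 - b.length) = i + 1 - b.length from by omega,
        List.range'_eq_map_range, List.countP_map]
    have hl : min (List.drop (i + 1 - b.length) a).length b.length
        = min a.length (i + 1) - (i + 1 - b.length) := by simp; omega
    rw [hl]
    apply List.countP_congr
    intro q hq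
    rw [List.mem_range] at hq
    have hq1 : q < (List.drop (i + 1 - b.length) a).length := by simp; omega
    have hq2 : i + 1 - b.length + q < a.length := by simp at hq1; omega
    simp only [Function.comp]
    rw [List.getD_eq_getElem _ _ hq1, List.getD_eq_getElem _ _ hq2, List.getElem_drop,
        show b.length - 1 - q = i - (i + 1 - b.length + q) from by omega]

-- A's append loop is a map over the range
lemma align_eq_map {α β : Type} (f : α → β) (l : List α) :
    l.foldl (fun acc x => acc ++ [f x]) [] = l.map f := by
  rw [PySem.List.foldl_append_singleton_eq_map f l []]; rfl


-- ===== VERDICT (by name: the statement is the Claim_ definition above) =====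
theorem comparer_spec : Claim_equal_comparer := by
  intro p1 p2 _
  unfold Spec_comparer comparer comparer_alt
  by_cases h1 : p1.toList = []
  · simp [h1]
  by_cases h2 : p2.toList = []
  · simp [h2]
  simp only [h1, h2, decide_false, Bool.or_false, if_neg, Bool.false_eq_true,
    not_false_eq_true, List.length_reverse]
  congr 2
  rw [align_eq_map]
  apply List.map_congr_left
  intro i hi
  rw [List.mem_range] at hi
  rw [PySem.List.slice_from_natCast]
  rw [count4_eq_countP]
  exact congrArg _ (elem_eq p1.toList p2.toList h1 h2 i hi)
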